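-- pv_equiv track=rewrite | github.com/DrMWalters/tradingv2 | functions.py | orderSymbolsFunc
-- ===== SOURCE A (Python) =====
-- def orderSymbolsFunc(symbols = [], quoteAssets = []):
--
-- 	symbolsForOrdering = [[] for i in range(len(quoteAssets))]
--
-- 	for symbol in symbols:
--         # if the current symbols quote asset is one that we are interested in...
-- 		if symbol[2] in quoteAssets:
-- 			i = 0
--             # check quote assets and add symbol into ordered list of lists
-- 			for quoteAsset in quoteAssets:
-- 				if symbol[2] == quoteAsset:
-- 					symbolsForOrdering[i].append((symbol[0], symbol[1], symbol[2]))
-- 				i = i + 1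
--
--     # convert the list of lists into sigle list (now in order)
-- 	orderedSymbols = []
-- 	for i in range(len(symbolsForOrdering)):
-- 		orderedSymbols.extend(symbolsForOrdering[i])
--
-- 	return orderedSymbols
-- ===== SOURCE B (Python) =====
-- def orderSymbolsFunc(symbols = [], quoteAssets = []):
--     # group symbols by quote asset in one pass, then emit groups in quoteAssets order
--     groups = {}
--     for symbol in symbols:
--         groups.setdefault(symbol[2], []).append((symbol[0], symbol[1], symbol[2]))
--     orderedSymbols = []
--     for quoteAsset in quoteAssets:
--         orderedSymbols.extend(groups.get(quoteAsset, []))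
--     return orderedSymbols
-- ===== Notes on version B (the rewrite author's own statement) =====
-- stated objective: faster
-- what changed: Replaces A's per-symbol scan of quoteAssets into index-addressed buckets with a single dict-grouping pass over symbols followed by one pass over quoteAssets emitting each group.
import Mathlib
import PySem

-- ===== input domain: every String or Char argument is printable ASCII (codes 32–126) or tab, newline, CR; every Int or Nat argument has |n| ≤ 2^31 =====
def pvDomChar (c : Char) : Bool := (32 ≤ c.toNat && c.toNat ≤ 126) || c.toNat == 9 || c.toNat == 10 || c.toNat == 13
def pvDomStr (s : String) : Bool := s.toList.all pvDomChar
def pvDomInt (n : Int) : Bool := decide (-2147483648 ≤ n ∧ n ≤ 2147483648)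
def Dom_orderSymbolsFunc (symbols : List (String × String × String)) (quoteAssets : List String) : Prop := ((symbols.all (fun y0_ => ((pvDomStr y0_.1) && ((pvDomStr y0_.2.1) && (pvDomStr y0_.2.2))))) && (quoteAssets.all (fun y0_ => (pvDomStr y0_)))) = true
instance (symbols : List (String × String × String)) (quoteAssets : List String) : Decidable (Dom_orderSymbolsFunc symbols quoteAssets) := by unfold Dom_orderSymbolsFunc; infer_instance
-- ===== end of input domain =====

-- B groups symbols by quote asset with one dict pass and then emits the groups in
-- quoteAssets order (O(n+m) instead of A's per-symbol scan of quoteAssets, O(n*m)).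

-- ===== PORT A =====
def orderSymbolsFunc (symbols : List (String × String × String)) (quoteAssets : List String) : List (String × String × String) :=
  -- symbolsForOrdering = [[] for i in range(len(quoteAssets))]
  let symbolsForOrdering : List (List (String × String × String)) :=
    (PySem.List.pyRange 0 (PySem.List.len quoteAssets)).map (fun _ => [])
  -- for symbol in symbols: if symbol[2] in quoteAssets: i = 0; for quoteAsset in quoteAssets: …
  let symbolsForOrdering := symbols.foldl (fun sfo symbol =>
    if quoteAssets.contains symbol.2.2 then
      (quoteAssets.foldl
        (fun (st : List (List (String × String × String)) × Nat) quoteAsset =>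
          ((if symbol.2.2 == quoteAsset then
              st.1.modify st.2 (fun b => b ++ [(symbol.1, symbol.2.1, symbol.2.2)])
            else st.1), st.2 + 1))
        (sfo, 0)).1
    else sfo) symbolsForOrdering
  -- orderedSymbols = []; for i in range(len(symbolsForOrdering)): orderedSymbols.extend(…)
  (PySem.List.pyRange 0 (PySem.List.len symbolsForOrdering)).foldl
    (fun orderedSymbols i => orderedSymbols ++ PySem.List.pyGetD symbolsForOrdering i []) []

-- ===== PORT B =====
def orderSymbolsFunc_alt (symbols : List (String × String × String)) (quoteAssets : List String) : List (String × String × String) :=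
  -- groups = {}; for symbol in symbols: groups.setdefault(symbol[2], []).append(…)
  let groups : PySem.Dict String (List (String × String × String)) :=
    symbols.foldl (fun groups symbol =>
      groups.modify symbol.2.2 [] (fun g => g ++ [(symbol.1, symbol.2.1, symbol.2.2)]))
      PySem.Dict.empty
  -- orderedSymbols = []; for quoteAsset in quoteAssets: orderedSymbols.extend(groups.get(quoteAsset, []))
  quoteAssets.foldl (fun orderedSymbols quoteAsset =>
    orderedSymbols ++ groups.getD quoteAsset []) []

-- ===== PRECONDITION & SPEC =====
def Spec_orderSymbolsFunc (symbols : List (String × String × String)) (quoteAssets : List String) (out : List (String × String × String)) : Prop := out = orderSymbolsFunc_alt symbols quoteAssets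
instance (symbols : List (String × String × String)) (quoteAssets : List String) (out : List (String × String × String)) : Decidable (Spec_orderSymbolsFunc symbols quoteAssets out) := by unfold Spec_orderSymbolsFunc; infer_instance

-- ===== CLAIM (what is proved, stated in full; the proofs are below) =====
def Claim_equal_orderSymbolsFunc : Prop := ∀ (symbols : List (String × String × String)) (quoteAssets : List String), Dom_orderSymbolsFunc symbols quoteAssets → Spec_orderSymbolsFunc symbols quoteAssets (orderSymbolsFunc symbols quoteAssets)

-- ===== LEMMAS AND PROOFS =====

-- the tuple both programs rebuild from a symbol
def pvTup (s : String × String × String) : String × String × String := (s.1, s.2.1, s.2.2)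

-- the common value both ports are shown to compute
def pvGroups (symbols : List (String × String × String)) (q : String) : List (String × String × String) :=
  (symbols.filter (fun s => s.2.2 == q)).map pvTup

lemma modify_append_cons {α : Type} (pre : List α) (b : α) (bs : List α) (g : α → α) :
    (pre ++ b :: bs).modify pre.length g = pre ++ g b :: bs := by
  induction pre with
  | nil => simp [List.modify]
  | cons x xs ih => simpa [List.modify] using ih

-- pointwise congruence for zipWith, needing agreement only on actual pairs
lemma zipWith_congr_mem {α β γ : Type} (f g : α → β → γ) :
    ∀ (l : List α) (l' : List β), (∀ a ∈ l, ∀ b ∈ l', f a b = g a b) →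
      List.zipWith f l l' = List.zipWith g l l' := by
  intro l
  induction l with
  | nil => intro l' _; simp
  | cons a as ih =>
    intro l' h
    cases l' with
    | nil => simp
    | cons b bs =>
      simp only [List.zipWith_cons_cons]
      refine congrArg₂ _ (h a (by simp) b (by simp)) (ih bs ?_)
      intro x hx y hy; exact h x (by simp [hx]) y (by simp [hy])

lemma zipWith_zipWith_same {α β γ δ : Type} (f : α → γ → δ) (g : α → β → γ) :
    ∀ (l : List α) (l' : List β),
      List.zipWith f l (List.zipWith g l l') = List.zipWith (fun a b => f a (g a b)) l l' := by
  intro l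
  induction l with
  | nil => intro l'; simp
  | cons a as ih => intro l'; cases l' <;> simp [ih]

lemma zipWith_replicate_right {α γ : Type} (f : α → List γ → List γ) (c : List γ) :
    ∀ (l : List α), List.zipWith f l (List.replicate l.length c) = l.map (fun a => f a c) := by
  intro l; induction l with
  | nil => simp
  | cons a as ih => simp [List.replicate_succ, ih]

lemma zipWith_id_right {α γ : Type} :
    ∀ (l : List α) (l' : List γ), l'.length = l.length →
      List.zipWith (fun _ b => b) l l' = l' := by
  intro l
  induction l with
  | nil => intro l' h; simp_all [List.length_eq_zero_iff.mp h]
  | cons a as ih =>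
    intro l' h
    cases l' with
    | nil => simp at h
    | cons b bs => simpa using ih bs (by simpa using Nat.succ_injective h)

-- the inner for-quoteAsset loop of A, characterised as a zipWith over the buckets
lemma inner_loop_eq (key : String) (t : String × String × String) :
    ∀ (qas : List String) (pre sfo : List (List (String × String × String))),
      sfo.length = qas.length →
      (qas.foldl
        (fun (st : List (List (String × String × String)) × Nat) q =>
          ((if key == q then st.1.modify st.2 (fun b => b ++ [t]) else st.1), st.2 + 1))
        (pre ++ sfo, pre.length)).1
      = pre ++ List.zipWith (fun q b => if key == q then b ++ [t] else b) qas sfo := by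
  intro qas
  induction qas with
  | nil => intro pre sfo h; simp_all [List.length_eq_zero_iff.mp h]
  | cons q rest ih =>
    intro pre sfo h
    cases sfo with
    | nil => simp at h
    | cons b bs =>
      simp only [List.foldl_cons, List.zipWith_cons_cons]
      have hmod : (if key == q then (pre ++ b :: bs).modify pre.length (fun b => b ++ [t])
                   else pre ++ b :: bs)
                 = pre ++ (if key == q then b ++ [t] else b) :: bs := by
        by_cases hk : key == q <;> simp [hk, modify_append_cons]
      have hih := ih (pre ++ [(if key == q then b ++ [t] else b)]) bs (by simpa using Nat.succ_injective h)
      simp only [List.length_append, List.length_cons, List.length_nil, List.append_assoc,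
        List.singleton_append] at hih
      show (List.foldl _ ((if key == q then (pre ++ b :: bs).modify pre.length (fun b => b ++ [t])
          else pre ++ b :: bs), pre.length + 1) rest).1 = _
      rw [hmod]
      exact hih

-- the outer for-symbol loop of A
lemma outer_loop_eq :
    ∀ (symbols : List (String × String × String)) (qas : List String)
      (sfo : List (List (String × String × String))), sfo.length = qas.length →
      symbols.foldl (fun sfo symbol =>
        if qas.contains symbol.2.2 then
          (qas.foldl
            (fun (st : List (List (String × String × String)) × Nat) quoteAsset =>
              ((if symbol.2.2 == quoteAsset then
                  st.1.modify st.2 (fun b => b ++ [(symbol.1, symbol.2.1, symbol.2.2)])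
                else st.1), st.2 + 1))
            (sfo, 0)).1
        else sfo) sfo
      = List.zipWith (fun q b => b ++ pvGroups symbols q) qas sfo := by
  intro symbols
  induction symbols with
  | nil =>
    intro qas sfo h
    simp only [List.foldl_nil, pvGroups, List.filter_nil, List.map_nil]
    rw [zipWith_congr_mem (fun q b => b ++ ([] : List (String × String × String))) (fun _ b => b)
      qas sfo (by simp), zipWith_id_right qas sfo h]
  | cons s rest ih =>
    intro qas sfo h
    simp only [List.foldl_cons]
    by_cases hc : qas.contains s.2.2
    · rw [show (qas.foldl
            (fun (st : List (List (String × String × String)) × Nat) quoteAsset =>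
              ((if s.2.2 == quoteAsset then
                  st.1.modify st.2 (fun b => b ++ [(s.1, s.2.1, s.2.2)])
                else st.1), st.2 + 1))
            (sfo, 0)).1
          = List.zipWith (fun q b => if s.2.2 == q then b ++ [(s.1, s.2.1, s.2.2)] else b) qas sfo from by
            simpa using inner_loop_eq s.2.2 (s.1, s.2.1, s.2.2) qas [] sfo h]
      simp only [hc, if_true]
      rw [ih qas _ (by simp [h]), zipWith_zipWith_same]
      refine zipWith_congr_mem _ _ qas sfo ?_
      intro q _ b _
      by_cases hk : s.2.2 == q <;> simp [pvGroups, pvTup, hk]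
    · simp only [hc, Bool.false_eq_true, if_false]
      rw [ih qas sfo h]
      refine zipWith_congr_mem _ _ qas sfo ?_
      intro q hq b _
      have : (s.2.2 == q) = false := by
        simp only [beq_eq_false_iff_ne, ne_eq]
        intro h'
        exact (by simpa using hc : s.2.2 ∉ qas) (h' ▸ hq)
      simp [pvGroups, this]

-- the grouping dict of B, characterised per key
lemma groups_getD (q : String) :
    ∀ (symbols : List (String × String × String)) (d : PySem.Dict String (List (String × String × String))),
      (symbols.foldl (fun groups symbol =>
        groups.modify symbol.2.2 [] (fun g => g ++ [(symbol.1, symbol.2.1, symbol.2.2)])) d).getD q []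
      = d.getD q [] ++ pvGroups symbols q := by
  intro symbols
  induction symbols with
  | nil => intro d; simp [pvGroups]
  | cons s rest ih =>
    intro d
    simp only [List.foldl_cons]
    rw [ih, PySem.Dict.getD_modify]
    by_cases hq : q = s.2.2
    · simp [pvGroups, pvTup, hq]
    · have : (s.2.2 == q) = false := by simpa using fun h => hq h.symm
      simp [pvGroups, hq, this]

lemma orderSymbolsFunc_eq_flatMap (symbols : List (String × String × String)) (qas : List String) :
    orderSymbolsFunc symbols qas = qas.flatMap (pvGroups symbols) := by
  simp only [orderSymbolsFunc]
  rw [show ((PySem.List.pyRange 0 (PySem.List.len qas)).map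
        (fun _ => ([] : List (String × String × String))))
      = List.replicate qas.length [] from by
        simp [PySem.List.len, PySem.List.pyRange_zero_natCast, List.map_map,
          List.eq_replicate_iff]]
  rw [outer_loop_eq symbols qas _ (by simp), zipWith_replicate_right, PySem.List.foldl_append_eq_flatMap]
  rw [List.flatMap_def, PySem.List.map_pyGetD_pyRange_zero]
  simp [List.flatMap_def]

lemma orderSymbolsFunc_alt_eq_flatMap (symbols : List (String × String × String)) (qas : List String) :
    orderSymbolsFunc_alt symbols qas = qas.flatMap (pvGroups symbols) := by
  simp only [orderSymbolsFunc_alt]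
  rw [PySem.List.foldl_append_eq_flatMap]
  simp only [List.nil_append]
  refine List.flatMap_congr ?_
  intro q _
  rw [groups_getD q symbols PySem.Dict.empty]
  simp

-- ===== VERDICT (by name: the statement is the Claim_ definition above) =====
theorem orderSymbolsFunc_spec : Claim_equal_orderSymbolsFunc := by
  intro symbols qas _
  unfold Spec_orderSymbolsFunc
  rw [orderSymbolsFunc_eq_flatMap, orderSymbolsFunc_alt_eq_flatMap]
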